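-- pv_equiv track=rewrite | github.com/alexisargyris/lit-critic | lit_platform/services/index_projection_service.py | _sections_by_line
-- ===== SOURCE A (Python) =====
-- def _sections_by_line(lines: list[str]) -> dict[int, str]:
--     """Map heading line numbers to nearest preceding section title."""
--     section_starts: list[tuple[int, str]] = []
--     for line_no, line in enumerate(lines, start=1):
--         stripped = line.strip()
--         if stripped.startswith("## ") and not stripped.startswith("### "):
--             section_starts.append((line_no, stripped[3:].strip()))
--
--     line_to_section: dict[int, str] = {}
--     current_section = ""
--     section_idx = 0
--     for line_no, line in enumerate(lines, start=1):
--         while section_idx < len(section_starts) and section_starts[section_idx][0] <= line_no: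
--             current_section = section_starts[section_idx][1]
--             section_idx += 1
--         if line.strip().startswith("### "):
--             line_to_section[line_no] = current_section
--     return line_to_section
-- ===== SOURCE B (Python) =====
-- def _sections_by_line(lines: list[str]) -> dict[int, str]:
--     """Map heading line numbers to nearest preceding section title."""
--     line_to_section: dict[int, str] = {}
--     current_section = ""
--     for line_no, line in enumerate(lines, start=1):
--         stripped = line.strip()
--         if stripped.startswith("## ") and not stripped.startswith("### "):
--             current_section = stripped[3:].strip()
--         elif stripped.startswith("### "):
--             line_to_section[line_no] = current_section
--     return line_to_section
-- ===== Notes on version B (the rewrite author's own statement) =====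
-- stated objective: simpler
-- what changed: Replaces A's two passes (precomputed section_starts list plus a monotonic pointer with an inner while-loop) by a single pass that tracks the current section title in one string variable.
import Mathlib
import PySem

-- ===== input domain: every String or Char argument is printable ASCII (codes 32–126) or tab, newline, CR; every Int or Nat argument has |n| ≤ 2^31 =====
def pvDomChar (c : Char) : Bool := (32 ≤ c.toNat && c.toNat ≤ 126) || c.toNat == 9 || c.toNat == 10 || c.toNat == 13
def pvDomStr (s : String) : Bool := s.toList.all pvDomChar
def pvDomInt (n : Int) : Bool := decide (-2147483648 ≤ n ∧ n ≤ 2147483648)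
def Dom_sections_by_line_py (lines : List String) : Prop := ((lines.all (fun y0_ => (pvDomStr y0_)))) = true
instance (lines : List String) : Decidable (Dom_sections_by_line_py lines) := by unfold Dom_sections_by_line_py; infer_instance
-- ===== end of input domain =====

-- B is a one-pass rewrite of A (tracks the current section in a string instead of a
-- precomputed section_starts list with a pointer); same return value on every input.

-- ===== PORT A =====
-- first loop of A: collect (line_no, title) for every '## ' heading
def pvStartsA (n : Int) (ls : List String) : List (Int × String) :=
  match ls with
  | [] => []
  | l :: rest =>
    if PySem.Str.startswith (PySem.Str.strip l) "## "
        && !(PySem.Str.startswith (PySem.Str.strip l) "### ") then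
      (n, PySem.Str.strip (PySem.Str.slice (PySem.Str.strip l) (some 3) none))
        :: pvStartsA (n + 1) rest
    else pvStartsA (n + 1) rest

-- the inner while-loop of A's second pass: advance over entries with fst ≤ line_no
-- (the index pointer is represented as the not-yet-consumed suffix of section_starts)
def pvAdvanceA (ss : List (Int × String)) (cur : String) (lineNo : Int) : List (Int × String) × String :=
  match ss with
  | [] => ([], cur)
  | (k, t) :: rest => if k ≤ lineNo then pvAdvanceA rest t lineNo else ((k, t) :: rest, cur)

-- second loop of A
def pvLoopA (n : Int) (ls : List String) (d : PySem.Dict Int String) (cur : String)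
    (ss : List (Int × String)) : PySem.Dict Int String :=
  match ls with
  | [] => d
  | l :: rest =>
    if PySem.Str.startswith (PySem.Str.strip l) "### " then
      pvLoopA (n + 1) rest (d.insert n (pvAdvanceA ss cur n).2) (pvAdvanceA ss cur n).2
        (pvAdvanceA ss cur n).1
    else pvLoopA (n + 1) rest d (pvAdvanceA ss cur n).2 (pvAdvanceA ss cur n).1

def sections_by_line_py (lines : List String) : List (Int × String) :=
  (pvLoopA 1 lines PySem.Dict.empty "" (pvStartsA 1 lines)).items

-- ===== PORT B =====
def pvLoopB (n : Int) (ls : List String) (d : PySem.Dict Int String) (cur : String) :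
    PySem.Dict Int String :=
  match ls with
  | [] => d
  | l :: rest =>
    if PySem.Str.startswith (PySem.Str.strip l) "## "
        && !(PySem.Str.startswith (PySem.Str.strip l) "### ") then
      pvLoopB (n + 1) rest d (PySem.Str.strip (PySem.Str.slice (PySem.Str.strip l) (some 3) none))
    else if PySem.Str.startswith (PySem.Str.strip l) "### " then
      pvLoopB (n + 1) rest (d.insert n cur) cur
    else pvLoopB (n + 1) rest d cur

def sections_by_line_py_alt (lines : List String) : List (Int × String) :=
  (pvLoopB 1 lines PySem.Dict.empty "").items

-- ===== PRECONDITION & SPEC =====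
def Spec_sections_by_line_py (lines : List String) (out : List (Int × String)) : Prop := out = sections_by_line_py_alt lines
instance (lines : List String) (out : List (Int × String)) : Decidable (Spec_sections_by_line_py lines out) := by unfold Spec_sections_by_line_py; infer_instance

-- ===== CLAIM (what is proved, stated in full; the proofs are below) =====
def Claim_equal_sections_by_line_py : Prop := ∀ (lines : List String), Dom_sections_by_line_py lines → Spec_sections_by_line_py lines (sections_by_line_py lines)

-- ===== LEMMAS AND PROOFS =====

-- every line number recorded in pvStartsA n ls is ≥ n
lemma pvStartsA_fst_ge (n : Int) (ls : List String) :
    ∀ p ∈ pvStartsA n ls, n ≤ p.1 := by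
  induction ls generalizing n with
  | nil => simp [pvStartsA]
  | cons l rest ih =>
    intro p hp
    simp only [pvStartsA] at hp
    split at hp
    · rcases List.mem_cons.mp hp with h | h
      · simp [h]
      · have := ih (n + 1) p h; omega
    · have := ih (n + 1) p hp; omega

-- the while-loop consumes nothing when every remaining entry is strictly ahead
lemma pvAdvanceA_none (ss : List (Int × String)) (cur : String) (lineNo : Int)
    (h : ∀ p ∈ ss, lineNo < p.1) : pvAdvanceA ss cur lineNo = (ss, cur) := by
  cases ss with
  | nil => rfl
  | cons p rest =>
    obtain ⟨k, t⟩ := p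
    have hk : lineNo < k := h (k, t) (by simp)
    rw [pvAdvanceA, if_neg (by omega)]

-- a line beginning with '### ' also begins with '## '? No — the third characters differ.
lemma not_startswith_sharp3_of (s : String)
    (h : (PySem.Str.startswith s "## " && !(PySem.Str.startswith s "### ")) = true) :
    PySem.Str.startswith s "### " = false := by
  simp only [Bool.and_eq_true, Bool.not_eq_true'] at h
  exact h.2

-- main invariant: A's second loop, fed the section starts of the remaining lines,
-- computes exactly B's one-pass loop
lemma loopA_eq_loopB (ls : List String) (n : Int) (d : PySem.Dict Int String) (cur : String) :
    pvLoopA n ls d cur (pvStartsA n ls) = pvLoopB n ls d cur := by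
  induction ls generalizing n d cur with
  | nil => rfl
  | cons l rest ih =>
    have hge : ∀ p ∈ pvStartsA (n + 1) rest, n < p.1 := by
      intro p hp
      have := pvStartsA_fst_ge (n + 1) rest p hp; omega
    rw [pvStartsA, pvLoopA, pvLoopB]
    by_cases hsec : (PySem.Str.startswith (PySem.Str.strip l) "## "
        && !(PySem.Str.startswith (PySem.Str.strip l) "### ")) = true
    · have h3 : PySem.Str.startswith (PySem.Str.strip l) "### " = false :=
        not_startswith_sharp3_of _ hsec
      have h2 : PySem.Str.startswith (PySem.Str.strip l) "## " = true :=
        ((Bool.and_eq_true _ _).mp hsec).1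
      have hadv : pvAdvanceA ((n, PySem.Str.strip (PySem.Str.slice (PySem.Str.strip l) (some 3) none))
            :: pvStartsA (n + 1) rest) cur n
          = (pvStartsA (n + 1) rest,
             PySem.Str.strip (PySem.Str.slice (PySem.Str.strip l) (some 3) none)) := by
        rw [pvAdvanceA, if_pos (le_refl n), pvAdvanceA_none _ _ _ hge]
      simp only [h2, h3, Bool.not_false, Bool.and_self, if_true,
        Bool.false_eq_true, if_false, hadv]
      exact ih (n + 1) d _
    · simp only [Bool.not_eq_true] at hsec
      have hss : pvAdvanceA (pvStartsA (n + 1) rest) cur n = (pvStartsA (n + 1) rest, cur) :=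
        pvAdvanceA_none _ _ _ hge
      by_cases h3 : PySem.Str.startswith (PySem.Str.strip l) "### " = true
      · simp only [h3, Bool.not_true, Bool.and_false, Bool.false_eq_true, if_false, hss,
          if_true]
        exact ih (n + 1) _ _
      · have h2 : PySem.Str.startswith (PySem.Str.strip l) "## " = false := by
          cases hb : PySem.Str.startswith (PySem.Str.strip l) "## " with
          | false => rfl
          | true =>
            rw [hb, Bool.true_and, Bool.not_eq_false'] at hsec
            exact absurd hsec h3
        simp only [h2, h3, Bool.false_and, Bool.false_eq_true, if_false, hss]
        exact ih (n + 1) _ _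

-- ===== VERDICT (by name: the statement is the Claim_ definition above) =====
theorem sections_by_line_py_spec : Claim_equal_sections_by_line_py := by
  intro lines _
  unfold Spec_sections_by_line_py sections_by_line_py sections_by_line_py_alt
  rw [loopA_eq_loopB]
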